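-- pv_equiv track=rewrite | github.com/anarkaytis/LeetCode | n3714.py | longestDuo
-- ===== SOURCE A (Python) =====
-- def longestDuo(s: str, increase: str, exclude: str) -> int:
--     n = len(s)
--     level = 0
--     result = 0
--     firstSeen = {}
--     firstSeen[level] = -1
--
--     for i in range(n):
--         if s[i] == exclude:
--             level = 0
--             firstSeen = {}
--             firstSeen[level] = i
--         else:
--             if s[i] == increase:
--                 level += 1
--             else:
--                 level -= 1
--             if level not in firstSeen:
--                 firstSeen[level] = i
--             else:
--                 result = max(result, i - firstSeen[level])
--
--     return result
-- ===== SOURCE B (Python) =====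
-- def longestDuo(s: str, increase: str, exclude: str) -> int:
--     n = len(s)
--     result = 0
--     for i in range(n):
--         bal = 0
--         for j in range(i, n):
--             if s[j] == exclude:
--                 break
--             if s[j] == increase:
--                 bal += 1
--             else:
--                 bal -= 1
--             if bal == 0:
--                 result = max(result, j - i + 1)
--     return result
-- ===== Notes on version B (the rewrite author's own statement) =====
-- stated objective: simpler
-- what changed: Replaced A's one-pass first-seen-level hashmap over exclude-delimited segments by a plain brute-force scan over all start positions: walk forward keeping a +1/-1 balance, break at the exclude char, record the window length whenever the balance is zero.
import Mathlib
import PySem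

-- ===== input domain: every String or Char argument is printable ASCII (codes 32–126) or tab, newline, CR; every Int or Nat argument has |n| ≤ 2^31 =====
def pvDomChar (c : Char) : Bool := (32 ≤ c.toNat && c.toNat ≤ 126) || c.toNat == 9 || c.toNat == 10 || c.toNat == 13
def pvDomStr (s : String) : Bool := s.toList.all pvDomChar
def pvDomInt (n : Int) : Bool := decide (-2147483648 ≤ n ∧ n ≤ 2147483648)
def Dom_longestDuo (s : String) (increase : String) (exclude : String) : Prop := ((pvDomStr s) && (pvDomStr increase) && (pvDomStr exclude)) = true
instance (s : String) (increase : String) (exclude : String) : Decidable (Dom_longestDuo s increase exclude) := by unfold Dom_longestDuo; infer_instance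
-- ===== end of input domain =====

-- B replaces A's one-pass first-seen-level hashmap by a plain brute-force scan over all
-- start positions (simpler to read, O(n^2) instead of O(n)); proved to return the same value.

-- Python's `s[i] == t` compares the 1-character string s[i] with the string t.
def chEq (c : Char) (t : String) : Bool := String.mk [c] == t

-- ===== PORT A =====
def loopA (inc exc : String) : List Char → Int → Int → PySem.Dict Int Int → Int → Int
  | [], _i, _level, _fs, res => res
  | c :: rest, i, level, fs, res =>
    if chEq c exc then
      loopA inc exc rest (i + 1) 0 ((PySem.Dict.empty).insert 0 i) res
    else
      let level' := if chEq c inc then level + 1 else level - 1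
      match fs.get? level' with
      | none => loopA inc exc rest (i + 1) level' (fs.insert level' i) res
      | some j => loopA inc exc rest (i + 1) level' fs (max res (i - j))

def longestDuo (s : String) (increase : String) (exclude : String) : Int :=
  loopA increase exclude s.toList 0 0 ((PySem.Dict.empty).insert 0 (-1)) 0

-- ===== PORT B =====
def innerB (inc exc : String) : List Char → Int → Int → Int → Int
  | [], _len, _bal, res => res
  | c :: rest, len, bal, res =>
    if chEq c exc then res
    else
      let bal' := if chEq c inc then bal + 1 else bal - 1
      let res' := if bal' == 0 then max res (len + 1) else res
      innerB inc exc rest (len + 1) bal' res'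

def outerB (inc exc : String) : List Char → Int → Int
  | [], res => res
  | c :: rest, res => outerB inc exc rest (innerB inc exc (c :: rest) 0 0 res)

def longestDuo_alt (s : String) (increase : String) (exclude : String) : Int :=
  outerB increase exclude s.toList 0

-- ===== PRECONDITION & SPEC =====
def Spec_longestDuo (s : String) (increase : String) (exclude : String) (out : Int) : Prop := out = longestDuo_alt s increase exclude
instance (s : String) (increase : String) (exclude : String) (out : Int) : Decidable (Spec_longestDuo s increase exclude out) := by unfold Spec_longestDuo; infer_instance

-- ===== CLAIM (what is proved, stated in full; the proofs are below) =====
def Claim_equal_longestDuo : Prop := ∀ (s : String) (increase : String) (exclude : String), Dom_longestDuo s increase exclude → Spec_longestDuo s increase exclude (longestDuo s increase exclude)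

-- ===== LEMMAS AND PROOFS =====

-- value of one character: +1 if it equals `increase`, else -1
def pvVal (inc : String) (c : Char) : Int := if chEq c inc then 1 else -1

def pvSum (inc : String) (l : List Char) : Int := (l.map (pvVal inc)).sum

-- prefix "level" after k characters of a segment
def pvL (inc : String) (seg : List Char) (k : ℕ) : Int := pvSum inc (seg.take k)

-- first index j ≤ k with pvL j = v
def pvF (inc : String) (seg : List Char) (v : Int) : ℕ → Option ℕ
  | 0 => if pvL inc seg 0 = v then some 0 else none
  | k + 1 =>
    match pvF inc seg v k with
    | some j => some j
    | none => if pvL inc seg (k + 1) = v then some (k + 1) else none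

-- the values A's loop feeds into `max`, from segment position a on
def pvEmits (inc : String) (seg : List Char) (a : ℕ) : List Int :=
  (List.range' a (seg.length - a)).filterMap
    (fun k => (pvF inc seg (pvL inc seg (k + 1)) k).map (fun (j : ℕ) => (k : Int) + 1 - j))

-- the values B's inner loop feeds into `max` (window lengths, from a fixed start)
def pvCands (inc exc : String) (bal : Int) : List Char → List Int
  | [] => []
  | c :: l =>
    if chEq c exc then []
    else (if bal + pvVal inc c = 0 then [(1 : Int)] else [])
      ++ (pvCands inc exc (bal + pvVal inc c) l).map (· + 1)

-- all of B's candidate values over a segment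
def pvCB (inc exc : String) : List Char → List Int
  | [] => []
  | c :: l => pvCands inc exc 0 (c :: l) ++ pvCB inc exc l

lemma pvL_zero (inc : String) (seg : List Char) : pvL inc seg 0 = 0 := by
  simp [pvL, pvSum]

lemma pvL_cons (inc : String) (c : Char) (l : List Char) (k : ℕ) :
    pvL inc (c :: l) (k + 1) = pvVal inc c + pvL inc l k := by
  simp [pvL, pvSum, List.take_succ_cons]

lemma pvL_take_left (inc : String) (t u : List Char) : pvL inc (t ++ u) t.length = pvSum inc t := by
  simp [pvL]

lemma pvL_mid (inc : String) (t u : List Char) (c : Char) :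
    pvL inc (t ++ c :: u) (t.length + 1) = pvL inc (t ++ c :: u) t.length + pvVal inc c := by
  have h1 : (t ++ c :: u).take (t.length + 1) = t ++ [c] := by
    simp [List.take_append]
  rw [pvL, h1, pvL_take_left]
  simp [pvSum]

-- ---- foldl-max toolkit ----

lemma foldl_max_le_iff (l : List Int) : ∀ (r c : Int), l.foldl max r ≤ c ↔ r ≤ c ∧ ∀ x ∈ l, x ≤ c := by
  induction l with
  | nil => simp
  | cons a l ih =>
    intro r c
    simp only [List.foldl_cons, ih, max_le_iff, List.mem_cons]
    constructor
    · rintro ⟨⟨h1, h2⟩, h3⟩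
      refine ⟨h1, fun x hx => ?_⟩
      rcases hx with rfl | hx
      · exact h2
      · exact h3 x hx
    · rintro ⟨h1, h2⟩
      exact ⟨⟨h1, h2 a (Or.inl rfl)⟩, fun x hx => h2 x (Or.inr hx)⟩

lemma le_foldl_max (l : List Int) : ∀ r : Int, r ≤ l.foldl max r := by
  induction l with
  | nil => simp
  | cons a l ih =>
    intro r
    exact le_trans (le_max_left r a) (ih (max r a))

lemma mem_le_foldl_max (l : List Int) : ∀ (r x : Int), x ∈ l → x ≤ l.foldl max r := by
  induction l with
  | nil => simp
  | cons a l ih =>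
    intro r x hx
    rcases List.mem_cons.1 hx with rfl | hx
    · exact le_trans (le_max_right r x) (le_foldl_max l _)
    · exact ih _ _ hx

lemma foldl_max_congr (l₁ l₂ : List Int)
    (h₁ : ∀ x ∈ l₁, ∃ y ∈ l₂, x ≤ y) (h₂ : ∀ y ∈ l₂, ∃ x ∈ l₁, y ≤ x) (r : Int) :
    l₁.foldl max r = l₂.foldl max r := by
  apply le_antisymm
  · rw [foldl_max_le_iff]
    refine ⟨le_foldl_max _ _, fun x hx => ?_⟩
    obtain ⟨y, hy, hxy⟩ := h₁ x hx
    exact le_trans hxy (mem_le_foldl_max _ _ _ hy)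
  · rw [foldl_max_le_iff]
    refine ⟨le_foldl_max _ _, fun y hy => ?_⟩
    obtain ⟨x, hx, hyx⟩ := h₂ y hy
    exact le_trans hyx (mem_le_foldl_max _ _ _ hx)

-- ---- B-side characterisation ----

lemma innerB_break (inc exc : String) (e : Char) (he : chEq e exc = true) :
    ∀ (l : List Char), (∀ c ∈ l, chEq c exc = false) → ∀ (rest : List Char) (len bal res : Int),
      innerB inc exc (l ++ e :: rest) len bal res = innerB inc exc l len bal res := by
  intro l
  induction l with
  | nil => intro _ rest len bal res; simp [innerB, he]
  | cons c l ih =>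
    intro h rest len bal res
    have hc : chEq c exc = false := h c (by simp)
    simp only [List.cons_append, innerB, hc, Bool.false_eq_true, if_false]
    exact ih (fun x hx => h x (by simp [hx])) rest _ _ _

lemma innerB_cands (inc exc : String) :
    ∀ (l : List Char) (len bal res : Int),
      innerB inc exc l len bal res
        = (pvCands inc exc bal l).foldl (fun r d => max r (len + d)) res := by
  intro l
  induction l with
  | nil => intro len bal res; simp [innerB, pvCands]
  | cons c l ih =>
    intro len bal res
    by_cases hc : chEq c exc = true
    · simp [innerB, pvCands, hc]
    · have hc' : chEq c exc = false := by simpa using hc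
      have hbal : (if chEq c inc then bal + 1 else bal - 1) = bal + pvVal inc c := by
        simp only [pvVal]; split <;> ring
      simp only [innerB, hc', Bool.false_eq_true, if_false, pvCands, hbal]
      rw [ih, List.foldl_append, List.foldl_map]
      have hfun : (fun (r d : Int) => max r (len + (d + 1))) = fun r d => max r (len + 1 + d) := by
        funext r d
        have : len + (d + 1) = len + 1 + d := by ring
        rw [this]
      rw [hfun]
      congr 1
      by_cases hz : bal + pvVal inc c = 0
      · simp [hz]
      · have hz' : (bal + pvVal inc c == 0) = false := by simpa using hz
        simp [hz, hz']

lemma mem_pvCands (inc exc : String) :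
    ∀ (l : List Char), (∀ c ∈ l, chEq c exc = false) → ∀ (bal d : Int),
      (d ∈ pvCands inc exc bal l
        ↔ ∃ j : ℕ, j < l.length ∧ bal + pvSum inc (l.take (j + 1)) = 0 ∧ d = (j : Int) + 1) := by
  intro l
  induction l with
  | nil => intro _ bal d; simp [pvCands]
  | cons c l ih =>
    intro h bal d
    have hc : chEq c exc = false := h c (by simp)
    have ihl := ih (fun x hx => h x (by simp [hx]))
    simp only [pvCands, hc, Bool.false_eq_true, if_false, List.mem_append, List.mem_map]
    constructor
    · rintro (h1 | ⟨d', hd', rfl⟩)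
      · by_cases hz : bal + pvVal inc c = 0
        · simp only [hz, if_pos, List.mem_singleton] at h1
          exact ⟨0, by simp, by simpa [pvSum] using hz, by simp [h1]⟩
        · simp [hz] at h1
      · obtain ⟨j, hj, hsum, rfl⟩ := (ihl _ _).1 hd'
        refine ⟨j + 1, by simpa using hj, ?_, by push_cast; ring⟩
        rw [List.take_succ_cons]
        simp only [pvSum, List.map_cons, List.sum_cons] at hsum ⊢
        linarith
    · rintro ⟨j, hj, hsum, rfl⟩
      cases j with
      | zero =>
        left
        have hz : bal + pvVal inc c = 0 := by simpa [pvSum] using hsum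
        simp [hz]
      | succ j' =>
        right
        refine ⟨(j' : Int) + 1, (ihl _ _).2 ⟨j', by simpa using hj, ?_, rfl⟩, by push_cast; ring⟩
        rw [List.take_succ_cons] at hsum
        simp only [pvSum, List.map_cons, List.sum_cons] at hsum ⊢
        linarith

lemma outerB_cons_exc (inc exc : String) (e : Char) (he : chEq e exc = true) (rest : List Char) (res : Int) :
    outerB inc exc (e :: rest) res = outerB inc exc rest res := by
  simp [outerB, innerB, he]

lemma outerB_seg (inc exc : String) :
    ∀ (seg : List Char), (∀ c ∈ seg, chEq c exc = false) →
      ∀ (rest : List Char), (rest = [] ∨ ∃ e r', rest = e :: r' ∧ chEq e exc = true) →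
      ∀ res : Int,
        outerB inc exc (seg ++ rest) res = outerB inc exc rest ((pvCB inc exc seg).foldl max res) := by
  intro seg
  induction seg with
  | nil => intro _ rest _ res; simp [pvCB]
  | cons c l ih =>
    intro h rest hrest res
    have hc : chEq c exc = false := h c (by simp)
    have hl : ∀ x ∈ l, chEq x exc = false := fun x hx => h x (by simp [hx])
    have hinner : innerB inc exc ((c :: l) ++ rest) 0 0 res = innerB inc exc (c :: l) 0 0 res := by
      rcases hrest with rfl | ⟨e, r', rfl, he⟩
      · simp
      · exact innerB_break inc exc e he (c :: l) h r' 0 0 res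
    have hcons : outerB inc exc ((c :: l) ++ rest) res
        = outerB inc exc (l ++ rest) (innerB inc exc ((c :: l) ++ rest) 0 0 res) := by
      simp [outerB]
    rw [hcons, hinner, innerB_cands]
    have hfun : (fun (r d : Int) => max r ((0 : Int) + d)) = fun r d => max r d := by
      funext r d; rw [zero_add]
    rw [hfun, ih hl rest hrest]
    have : pvCB inc exc (c :: l) = pvCands inc exc 0 (c :: l) ++ pvCB inc exc l := rfl
    rw [this, List.foldl_append]

lemma mem_pvCB (inc exc : String) :
    ∀ (seg : List Char), (∀ c ∈ seg, chEq c exc = false) → ∀ d : Int,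
      (d ∈ pvCB inc exc seg
        ↔ ∃ a b : ℕ, a < b ∧ b ≤ seg.length ∧ pvL inc seg a = pvL inc seg b ∧ d = (b : Int) - a) := by
  intro seg
  induction seg with
  | nil =>
    intro _ d
    simp only [pvCB, List.not_mem_nil, false_iff, not_exists]
    rintro a b ⟨hab, hb, _, _⟩
    simp only [List.length_nil, Nat.le_zero] at hb
    omega
  | cons c l ih =>
    intro h d
    have hl : ∀ x ∈ l, chEq x exc = false := fun x hx => h x (by simp [hx])
    have ihl := ih hl
    have hmc := mem_pvCands inc exc (c :: l) h 0 d
    constructor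
    · intro hd
      rcases List.mem_append.1 hd with h1 | h1
      · obtain ⟨j, hj, hsum, rfl⟩ := hmc.1 h1
        refine ⟨0, j + 1, by omega, by simpa using hj, ?_, by push_cast; ring⟩
        rw [pvL_zero]
        simp only [pvL]
        linarith
      · obtain ⟨a, b, hab, hb, heq, rfl⟩ := (ihl _).1 h1
        refine ⟨a + 1, b + 1, by omega, by simpa using hb, ?_, by push_cast; ring⟩
        cases b with
        | zero => omega
        | succ b' =>
          rw [pvL_cons, pvL_cons, heq]
    · rintro ⟨a, b, hab, hb, heq, rfl⟩
      apply List.mem_append.2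
      cases a with
      | zero =>
        left
        cases b with
        | zero => omega
        | succ b' =>
          apply hmc.2
          refine ⟨b', by simpa using hb, ?_, by push_cast; ring⟩
          rw [pvL_zero] at heq
          simp only [pvL] at heq
          linarith
      | succ a' =>
        right
        cases b with
        | zero => omega
        | succ b' =>
          apply (ihl _).2
          rw [pvL_cons, pvL_cons] at heq
          refine ⟨a', b', by omega, by simpa using hb, by linarith, by push_cast; ring⟩

-- ---- A-side: pvF facts ----

lemma pvF_some (inc : String) (seg : List Char) (v : Int) :
    ∀ (k j : ℕ), pvF inc seg v k = some j → j ≤ k ∧ pvL inc seg j = v := by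
  intro k
  induction k with
  | zero =>
    intro j hj
    simp only [pvF] at hj
    split at hj
    · cases hj; exact ⟨le_refl _, by assumption⟩
    · cases hj
  | succ k ih =>
    intro j hj
    simp only [pvF] at hj
    rcases hF : pvF inc seg v k with _ | j'
    · rw [hF] at hj
      simp only at hj
      split at hj
      · cases hj; exact ⟨le_refl _, by assumption⟩
      · cases hj
    · rw [hF] at hj
      simp only at hj
      cases hj
      obtain ⟨h1, h2⟩ := ih _ hF
      exact ⟨by omega, h2⟩

lemma pvF_exists (inc : String) (seg : List Char) (v : Int) :
    ∀ (k a : ℕ), a ≤ k → pvL inc seg a = v → ∃ j, pvF inc seg v k = some j ∧ j ≤ a := by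
  intro k
  induction k with
  | zero =>
    intro a ha hv
    interval_cases a
    exact ⟨0, by simp [pvF, hv], le_refl _⟩
  | succ k ih =>
    intro a ha hv
    rcases hF : pvF inc seg v k with _ | j
    · have hak : a = k + 1 := by
        by_contra hne
        have : a ≤ k := by omega
        obtain ⟨j, hj, _⟩ := ih a this hv
        rw [hF] at hj; cases hj
      subst hak
      refine ⟨k + 1, ?_, le_refl _⟩
      simp only [pvF, hF]
      simp [hv]
    · obtain ⟨hj1, _⟩ := pvF_some inc seg v k j hF
      by_cases hak : a ≤ k
      · obtain ⟨j', hj', hle⟩ := ih a hak hv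
        rw [hF] at hj'
        have hjj : j = j' := by injection hj'
        exact ⟨j, by simp [pvF, hF], by omega⟩
      · exact ⟨j, by simp [pvF, hF], by omega⟩

lemma mem_pvEmits (inc : String) (seg : List Char) (d : Int) :
    d ∈ pvEmits inc seg 0
      ↔ ∃ (k j : ℕ), k < seg.length ∧ pvF inc seg (pvL inc seg (k + 1)) k = some j
          ∧ d = (k : Int) + 1 - j := by
  simp only [pvEmits, List.mem_filterMap, List.mem_range', Nat.sub_zero, Option.map_eq_some_iff]
  constructor
  · rintro ⟨k, hk, j, hj, hd⟩
    exact ⟨k, j, by omega, hj, hd.symm⟩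
  · rintro ⟨k, j, hk, hj, hd⟩
    exact ⟨k, ⟨k, by omega, by omega⟩, j, hj, hd.symm⟩

-- ---- A-side loop invariant over one exclude-free segment ----

lemma loopA_inv (inc exc : String) (seg : List Char) (hnE : ∀ c ∈ seg, chEq c exc = false) :
    ∀ (u t : List Char), seg = t ++ u →
      ∀ (i0 res : Int) (fs : PySem.Dict Int Int) (rest : List Char),
        (∀ v, fs.get? v = (pvF inc seg v t.length).map (fun (j : ℕ) => i0 - 1 + (j : Int))) →
        ∃ lv fs',
          loopA inc exc (u ++ rest) (i0 + t.length) (pvL inc seg t.length) fs res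
            = loopA inc exc rest (i0 + seg.length) lv fs'
                ((pvEmits inc seg t.length).foldl max res) := by
  intro u
  induction u with
  | nil =>
    intro t hseg i0 res fs rest hfs
    have ht : t = seg := by rw [hseg, List.append_nil]
    subst ht
    have hemits : pvEmits inc t t.length = [] := by
      simp [pvEmits]
    rw [hemits]
    exact ⟨pvL inc t t.length, fs, by simp⟩
  | cons c u' ihu =>
    intro t hseg i0 res fs rest hfs
    have hc : chEq c exc = false := hnE c (by rw [hseg]; simp)
    have hklt : t.length < seg.length := by
      rw [hseg]; simp only [List.length_append, List.length_cons]; omega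
    have hlev : (if chEq c inc then pvL inc seg t.length + 1 else pvL inc seg t.length - 1)
        = pvL inc seg (t.length + 1) := by
      rw [hseg, pvL_mid]
      simp only [pvVal]
      split <;> ring
    -- one step of the loop
    have hstep : loopA inc exc ((c :: u') ++ rest) (i0 + t.length) (pvL inc seg t.length) fs res
        = (match fs.get? (pvL inc seg (t.length + 1)) with
           | none => loopA inc exc (u' ++ rest) (i0 + t.length + 1) (pvL inc seg (t.length + 1))
               (fs.insert (pvL inc seg (t.length + 1)) (i0 + t.length)) res
           | some j => loopA inc exc (u' ++ rest) (i0 + t.length + 1) (pvL inc seg (t.length + 1)) fs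
               (max res ((i0 + t.length) - j))) := by
      simp only [List.cons_append, loopA, hc, Bool.false_eq_true, if_false, hlev]
    have hseg' : seg = (t ++ [c]) ++ u' := by rw [hseg]; simp
    have htlen' : (t ++ [c]).length = t.length + 1 := by simp
    have hidx : i0 + t.length + 1 = i0 + ((t ++ [c]).length : Int) := by
      push_cast [htlen']; ring
    have hrange : List.range' t.length (seg.length - t.length)
        = t.length :: List.range' (t.length + 1) (seg.length - (t.length + 1)) := by
      have h1 : seg.length - t.length = (seg.length - (t.length + 1)) + 1 := by omega
      rw [h1, List.range'_succ]
    rcases hF : fs.get? (pvL inc seg (t.length + 1)) with _ | jv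
    · -- level' not seen: insert
      have hFnone : pvF inc seg (pvL inc seg (t.length + 1)) t.length = none := by
        have := hfs (pvL inc seg (t.length + 1))
        rw [hF] at this
        exact (Option.map_eq_none_iff).1 this.symm
      have hfs' : ∀ v, (fs.insert (pvL inc seg (t.length + 1)) (i0 + t.length)).get? v
          = (pvF inc seg v ((t ++ [c]).length)).map (fun (j : ℕ) => i0 - 1 + (j : Int)) := by
        intro v
        rw [htlen', PySem.Dict.get?_insert]
        by_cases hv : v = pvL inc seg (t.length + 1)
        · subst hv
          have hnew : pvF inc seg (pvL inc seg (t.length + 1)) (t.length + 1)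
              = some (t.length + 1) := by
            simp [pvF, hFnone]
          rw [if_pos rfl, hnew, Option.map_some]
          congr 1
          push_cast
          ring
        · rw [if_neg hv, hfs v]
          rcases hFv : pvF inc seg v t.length with _ | j
          · have hne : pvL inc seg (t.length + 1) ≠ v := fun h => hv h.symm
            simp [pvF, hFv, hne]
          · simp [pvF, hFv]
      have hemits : pvEmits inc seg t.length = pvEmits inc seg (t.length + 1) := by
        simp only [pvEmits, hrange, List.filterMap_cons, hFnone, Option.map_none]
      obtain ⟨lv, fs', hrec⟩ := ihu (t ++ [c]) hseg' i0 res
        (fs.insert (pvL inc seg (t.length + 1)) (i0 + t.length)) rest hfs'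
      rw [htlen'] at hrec
      refine ⟨lv, fs', ?_⟩
      rw [hstep, hF]
      simp only
      rw [hemits]
      have harith : i0 + (t.length : Int) + 1 = i0 + (((t.length + 1 : ℕ)) : Int) := by
        push_cast; ring
      rw [harith]
      exact hrec
    · -- level' seen before at jv = i0 - 1 + j
      obtain ⟨j, hFj, hjv⟩ : ∃ j, pvF inc seg (pvL inc seg (t.length + 1)) t.length = some j
          ∧ jv = i0 - 1 + (j : Int) := by
        have := hfs (pvL inc seg (t.length + 1))
        rw [hF] at this
        rcases Option.map_eq_some_iff.1 this.symm with ⟨j, hj1, hj2⟩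
        exact ⟨j, hj1, hj2.symm⟩
      have hres : (i0 + (t.length : Int)) - jv = (t.length : Int) + 1 - j := by
        rw [hjv]; ring
      have hfs' : ∀ v, fs.get? v = (pvF inc seg v ((t ++ [c]).length)).map (fun (j : ℕ) => i0 - 1 + (j : Int)) := by
        intro v
        rw [htlen', hfs v]
        rcases hFv : pvF inc seg v t.length with _ | j'
        · have hne : pvL inc seg (t.length + 1) ≠ v := by
            intro hveq
            rw [hveq, hFv] at hFj
            simp at hFj
          simp [pvF, hFv, hne]
        · simp [pvF, hFv]
      have hemits : pvEmits inc seg t.length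
          = ((t.length : Int) + 1 - j) :: pvEmits inc seg (t.length + 1) := by
        simp only [pvEmits, hrange, List.filterMap_cons, hFj, Option.map_some]
      obtain ⟨lv, fs', hrec⟩ := ihu (t ++ [c]) hseg' i0 (max res ((t.length : Int) + 1 - j)) fs rest hfs'
      rw [htlen'] at hrec
      refine ⟨lv, fs', ?_⟩
      rw [hstep, hF]
      simp only
      rw [hres, hemits]
      have harith : i0 + (t.length : Int) + 1 = i0 + (((t.length + 1 : ℕ)) : Int) := by
        push_cast; ring
      rw [harith]
      simp only [List.foldl_cons]
      exact hrec

-- ---- dominance: A's emissions and B's candidates have the same maximum ----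

lemma emits_eq_CB_foldl (inc exc : String) (seg : List Char) (hnE : ∀ c ∈ seg, chEq c exc = false)
    (r : Int) :
    (pvEmits inc seg 0).foldl max r = (pvCB inc exc seg).foldl max r := by
  apply foldl_max_congr
  · intro x hx
    obtain ⟨k, j, hk, hF, rfl⟩ := (mem_pvEmits inc seg x).1 hx
    obtain ⟨hjk, hLj⟩ := pvF_some inc seg _ k j hF
    refine ⟨(k : Int) + 1 - j, ?_, le_refl _⟩
    apply (mem_pvCB inc exc seg hnE _).2
    exact ⟨j, k + 1, by omega, by omega, by rw [hLj], by push_cast; ring⟩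
  · intro y hy
    obtain ⟨a, b, hab, hb, heq, rfl⟩ := (mem_pvCB inc exc seg hnE y).1 hy
    have hb1 : b - 1 + 1 = b := by omega
    obtain ⟨j, hF, hja⟩ := pvF_exists inc seg (pvL inc seg b) (b - 1) a (by omega) heq
    refine ⟨(↑(b - 1) : Int) + 1 - j, ?_, ?_⟩
    · apply (mem_pvEmits inc seg _).2
      exact ⟨b - 1, j, by omega, by rw [hb1]; exact hF, rfl⟩
    · omega

-- ---- takeWhile/dropWhile split ----

lemma dropWhile_head_false {p : Char → Bool} :
    ∀ (l : List Char) (e : Char) (r' : List Char), l.dropWhile p = e :: r' → p e = false := by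
  intro l
  induction l with
  | nil => intro e r' h; simp [List.dropWhile] at h
  | cons c l ih =>
    intro e r' h
    rw [List.dropWhile_cons] at h
    split at h
    · exact ih e r' h
    · cases h
      simpa using ‹¬ p c = true›

-- ---- top-level: induction over segments ----

lemma top_lemma (inc exc : String) :
    ∀ (n : ℕ) (cs : List Char), cs.length ≤ n → ∀ (i0 r : Int),
      loopA inc exc cs i0 0 ((PySem.Dict.empty).insert 0 (i0 - 1)) r = outerB inc exc cs r := by
  intro n
  induction n with
  | zero =>
    intro cs hcs i0 r
    have : cs = [] := List.length_eq_zero_iff.1 (by omega)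
    subst this
    simp [loopA, outerB]
  | succ n ih =>
    intro cs hcs i0 r
    obtain ⟨seg, rest, hsplit, hsegE, hrestshape⟩ :
        ∃ seg rest, cs = seg ++ rest ∧ (∀ c ∈ seg, chEq c exc = false)
          ∧ (rest = [] ∨ ∃ e r', rest = e :: r' ∧ chEq e exc = true) := by
      refine ⟨cs.takeWhile (fun c => !chEq c exc), cs.dropWhile (fun c => !chEq c exc),
        (List.takeWhile_append_dropWhile).symm, ?_, ?_⟩
      · intro c hc
        have := List.mem_takeWhile_imp hc
        simpa using this
      · rcases hre : cs.dropWhile (fun c => !chEq c exc) with _ | ⟨e, r'⟩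
        · exact Or.inl rfl
        · refine Or.inr ⟨e, r', rfl, ?_⟩
          have := dropWhile_head_false (p := fun c => !chEq c exc) cs e r' hre
          simpa using this
    subst hsplit
    have hfs0 : ∀ v : Int, ((PySem.Dict.empty : PySem.Dict Int Int).insert 0 (i0 - 1)).get? v
        = (pvF inc seg v ([] : List Char).length).map (fun (j : ℕ) => i0 - 1 + (j : Int)) := by
      intro v
      rw [PySem.Dict.get?_insert]
      simp only [List.length_nil, pvF, pvL_zero]
      by_cases hv : v = 0
      · subst hv
        simp
      · rw [if_neg hv, if_neg (fun h => hv h.symm)]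
        simp [PySem.Dict.get?_empty]
    obtain ⟨lv, fs', hA⟩ := loopA_inv inc exc seg hsegE seg [] rfl i0 r
      ((PySem.Dict.empty).insert 0 (i0 - 1)) rest hfs0
    simp only [List.length_nil, Nat.cast_zero, add_zero, pvL_zero] at hA
    rcases hrestshape with rfl | ⟨e, r', rfl, he⟩
    · -- no exclude character left: a single segment
      have hB := outerB_seg inc exc seg hsegE [] (Or.inl rfl) r
      rw [hA, hB]
      simp only [loopA, outerB]
      exact emits_eq_CB_foldl inc exc seg hsegE r
    · have hlen : r'.length ≤ n := by
        simp only [List.length_append, List.length_cons] at hcs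
        omega
      have hA2 : loopA inc exc (e :: r') (i0 + (seg.length : Int)) lv fs'
            ((pvEmits inc seg 0).foldl max r)
          = loopA inc exc r' (i0 + (seg.length : Int) + 1) 0
              ((PySem.Dict.empty).insert 0 (i0 + (seg.length : Int)))
              ((pvEmits inc seg 0).foldl max r) := by
        simp [loopA, he]
      have hih := ih r' hlen (i0 + (seg.length : Int) + 1) ((pvEmits inc seg 0).foldl max r)
      have hi0 : i0 + (seg.length : Int) + 1 - 1 = i0 + (seg.length : Int) := by ring
      rw [hi0] at hih
      have hB := outerB_seg inc exc seg hsegE (e :: r') (Or.inr ⟨e, r', rfl, he⟩) r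
      calc loopA inc exc (seg ++ e :: r') i0 0 ((PySem.Dict.empty).insert 0 (i0 - 1)) r
          = loopA inc exc (e :: r') (i0 + (seg.length : Int)) lv fs'
              ((pvEmits inc seg 0).foldl max r) := hA
        _ = outerB inc exc r' ((pvEmits inc seg 0).foldl max r) := by rw [hA2]; exact hih
        _ = outerB inc exc r' ((pvCB inc exc seg).foldl max r) := by
              rw [emits_eq_CB_foldl inc exc seg hsegE r]
        _ = outerB inc exc (e :: r') ((pvCB inc exc seg).foldl max r) :=
              (outerB_cons_exc inc exc e he r' _).symm
        _ = outerB inc exc (seg ++ e :: r') r := hB.symm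

-- ===== VERDICT (by name: the statement is the Claim_ definition above) =====
theorem longestDuo_spec : Claim_equal_longestDuo := by
  intro s increase exclude _dom
  unfold Spec_longestDuo longestDuo longestDuo_alt
  have h := top_lemma increase exclude s.toList.length s.toList (le_refl _) 0 0
  simpa using h
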